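-- pv_equiv track=rewrite | github.com/jfrochte/inbox-sentinel | email_report/vcard.py | _split_structured
-- ===== SOURCE A (Python) =====
-- def _unescape(value: str) -> str:
--     """vCard value unescaping: \\n -> newline, \\, -> comma, \\; -> semicolon."""
--     out = []
--     i = 0
--     while i < len(value):
--         if value[i] == '\\' and i + 1 < len(value):
--             nxt = value[i + 1]
--             if nxt == 'n' or nxt == 'N':
--                 out.append('\n')
--             elif nxt == ',':
--                 out.append(',')
--             elif nxt == ';':
--                 out.append(';')
--             elif nxt == '\\':
--                 out.append('\\')
--             else:
--                 out.append('\\')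
--                 out.append(nxt)
--             i += 2
--         else:
--             out.append(value[i])
--             i += 1
--     return ''.join(out)
--
-- def _split_structured(value: str, expected: int) -> list[str]:
--     """Split structured value on unescaped semicolons, unescape each part."""
--     parts: list[str] = []
--     current: list[str] = []
--     i = 0
--     while i < len(value):
--         if value[i] == '\\' and i + 1 < len(value):
--             current.append(value[i])
--             current.append(value[i + 1])
--             i += 2
--         elif value[i] == ';':
--             parts.append(_unescape(''.join(current)))
--             current = []
--             i += 1
--         else:
--             current.append(value[i])
--             i += 1
--     parts.append(_unescape(''.join(current)))
--     # Pad to expected length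
--     while len(parts) < expected:
--         parts.append("")
--     return parts
-- ===== SOURCE B (Python) =====
-- def _split_structured(value: str, expected: int) -> list[str]:
--     """Split structured value on unescaped semicolons, unescape each part.
--
--     Single pass: decode escape sequences inline while splitting, instead of
--     collecting raw segments and rescanning them with a separate unescape pass.
--     """
--     parts = []
--     cur = []
--     i = 0
--     n = len(value)
--     while i < n:
--         ch = value[i]
--         if ch == '\\' and i + 1 < n:
--             nxt = value[i + 1]
--             if nxt == 'n' or nxt == 'N':
--                 cur.append('\n')
--             elif nxt in (',', ';', '\\'):
--                 cur.append(nxt)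
--             else:
--                 cur.append('\\')
--                 cur.append(nxt)
--             i += 2
--         elif ch == ';':
--             parts.append(''.join(cur))
--             cur = []
--             i += 1
--         else:
--             cur.append(ch)
--             i += 1
--     parts.append(''.join(cur))
--     return parts + [""] * (expected - len(parts))
-- ===== Notes on version B (the rewrite author's own statement) =====
-- stated objective: simpler
-- what changed: B decodes escape sequences inline in a single pass while splitting (and pads with list arithmetic), instead of A's two-pass scheme that collects raw escaped segments and rescans each with a separate _unescape helper.
import Mathlib
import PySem

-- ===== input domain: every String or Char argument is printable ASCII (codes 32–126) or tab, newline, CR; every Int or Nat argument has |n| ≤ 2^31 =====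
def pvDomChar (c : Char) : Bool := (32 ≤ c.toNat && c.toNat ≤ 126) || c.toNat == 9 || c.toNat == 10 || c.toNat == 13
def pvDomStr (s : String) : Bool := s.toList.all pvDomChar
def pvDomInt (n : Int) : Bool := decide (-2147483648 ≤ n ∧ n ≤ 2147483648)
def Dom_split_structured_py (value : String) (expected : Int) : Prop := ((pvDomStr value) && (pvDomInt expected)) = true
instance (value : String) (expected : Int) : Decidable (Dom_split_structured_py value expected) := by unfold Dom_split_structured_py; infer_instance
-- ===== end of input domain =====

-- B decodes vCard escape sequences inline in a single pass while splitting on unescaped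
-- semicolons (padding with list arithmetic), instead of A's two-pass collect-then-unescape; objective: simpler.


-- ===== PORT A =====
-- port of _unescape: the while loop over indices becomes recursion on the char list;
-- "value[i]=='\\' and i+1<len(value)" is the two-element pattern.
def pvUnesc : List Char → List Char
  | [] => []
  | '\\' :: nxt :: rest =>
    (if nxt = 'n' ∨ nxt = 'N' then ['\n']
     else if nxt = ',' then [',']
     else if nxt = ';' then [';']
     else if nxt = '\\' then ['\\']
     else ['\\', nxt]) ++ pvUnesc rest
  | c :: rest => c :: pvUnesc rest

-- port of A's while loop: state (parts, current); after the loop the final part is appended.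
def pvALoop : List Char → List String → List Char → List String
  | [], parts, cur => parts ++ [(pvUnesc cur).asString]
  | '\\' :: nxt :: rest, parts, cur => pvALoop rest parts (cur ++ ['\\', nxt])
  | c :: rest, parts, cur =>
    if c = ';' then pvALoop rest (parts ++ [(pvUnesc cur).asString]) []
    else pvALoop rest parts (cur ++ [c])

-- port of A's padding loop: while len(parts) < expected: parts.append("")
def pvAPad (parts : List String) (expected : Int) : List String :=
  if parts.length < expected then pvAPad (parts ++ [""]) expected else parts
termination_by (expected - parts.length).toNat
decreasing_by simp; omega

def split_structured_py (value : String) (expected : Int) : List String :=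
  pvAPad (pvALoop value.toList [] []) expected

-- ===== PORT B =====
-- B's inline decoding of one escape sequence
def pvDecode (nxt : Char) : List Char :=
  if nxt = 'n' ∨ nxt = 'N' then ['\n']
  else if nxt = ',' ∨ nxt = ';' ∨ nxt = '\\' then [nxt]
  else ['\\', nxt]

-- B's single-pass loop: cur already holds decoded characters
def pvBLoop : List Char → List String → List Char → List String
  | [], parts, cur => parts ++ [cur.asString]
  | '\\' :: nxt :: rest, parts, cur => pvBLoop rest parts (cur ++ pvDecode nxt)
  | c :: rest, parts, cur =>
    if c = ';' then pvBLoop rest (parts ++ [cur.asString]) []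
    else pvBLoop rest parts (cur ++ [c])

def split_structured_py_alt (value : String) (expected : Int) : List String :=
  let parts := pvBLoop value.toList [] []
  parts ++ List.replicate (expected - parts.length).toNat ""

-- ===== PRECONDITION & SPEC =====
def Spec_split_structured_py (value : String) (expected : Int) (out : List String) : Prop := out = split_structured_py_alt value expected
instance (value : String) (expected : Int) (out : List String) : Decidable (Spec_split_structured_py value expected out) := by unfold Spec_split_structured_py; infer_instance

-- ===== CLAIM (what is proved, stated in full; the proofs are below) =====
def Claim_equal_split_structured_py : Prop := ∀ (value : String) (expected : Int), Dom_split_structured_py value expected → Spec_split_structured_py value expected (split_structured_py value expected)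

-- ===== LEMMAS AND PROOFS =====

-- "well-formed accumulator": unescaping distributes over any suffix (no dangling escape inside cur)
def pvWF (cur : List Char) : Prop := ∀ s, pvUnesc (cur ++ s) = pvUnesc cur ++ pvUnesc s

lemma pvWF_nil : pvWF [] := fun s => rfl

lemma pvUnesc_cons_ne {c : Char} (h : c ≠ '\\') (rest : List Char) :
    pvUnesc (c :: rest) = c :: pvUnesc rest := by
  cases rest <;> simp [pvUnesc, h]

lemma pvUnesc_pair (nxt : Char) (rest : List Char) :
    pvUnesc ('\\' :: nxt :: rest) = pvDecode nxt ++ pvUnesc rest := by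
  simp only [pvUnesc, pvDecode]
  by_cases h1 : nxt = 'n' ∨ nxt = 'N' <;> simp [h1] <;>
    by_cases h2 : nxt = ',' <;> simp [h2] <;>
    by_cases h3 : nxt = ';' <;> simp [h3] <;>
    by_cases h4 : nxt = '\\' <;> simp [h4]

lemma pvWF_pair {cur : List Char} (h : pvWF cur) (nxt : Char) : pvWF (cur ++ ['\\', nxt]) := by
  intro s
  have e : ∀ t, pvUnesc (cur ++ ('\\' :: nxt :: t)) = pvUnesc cur ++ (pvDecode nxt ++ pvUnesc t) := by
    intro t; rw [h ('\\' :: nxt :: t), pvUnesc_pair]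
  have e0 := e []
  simp only [List.append_assoc]
  show pvUnesc (cur ++ ('\\' :: nxt :: s)) = pvUnesc (cur ++ ('\\' :: nxt :: [])) ++ pvUnesc s
  rw [e s, e0]
  simp [pvUnesc]

lemma pvUnesc_append_pair {cur : List Char} (h : pvWF cur) (nxt : Char) :
    pvUnesc (cur ++ ['\\', nxt]) = pvUnesc cur ++ pvDecode nxt := by
  have := h ['\\', nxt]
  rw [this, pvUnesc_pair]
  simp [pvUnesc]

lemma pvWF_single {cur : List Char} (h : pvWF cur) {c : Char} (hc : c ≠ '\\') :
    pvWF (cur ++ [c]) := by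
  intro s
  have e : ∀ t, pvUnesc (cur ++ (c :: t)) = pvUnesc cur ++ (c :: pvUnesc t) := by
    intro t; rw [h (c :: t), pvUnesc_cons_ne hc]
  have e0 := e []
  simp only [List.append_assoc]
  show pvUnesc (cur ++ (c :: s)) = pvUnesc (cur ++ (c :: [])) ++ pvUnesc s
  rw [e s, e0]
  simp [pvUnesc]

lemma pvUnesc_append_single {cur : List Char} (h : pvWF cur) {c : Char} (hc : c ≠ '\\') :
    pvUnesc (cur ++ [c]) = pvUnesc cur ++ [c] := by
  rw [h [c], pvUnesc_cons_ne hc]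
  rfl

lemma pvUnesc_append_bs {cur : List Char} (h : pvWF cur) :
    pvUnesc (cur ++ ['\\']) = pvUnesc cur ++ ['\\'] := by
  rw [h ['\\']]
  rfl

-- reduction lemmas for the loops on a non-backslash head (overlapping literal patterns)
lemma pvALoop_ne {c : Char} (h : c ≠ '\\') (rest : List Char) (parts : List String) (cur : List Char) :
    pvALoop (c :: rest) parts cur =
      if c = ';' then pvALoop rest (parts ++ [(pvUnesc cur).asString]) []
      else pvALoop rest parts (cur ++ [c]) := by
  cases rest <;> simp [pvALoop, h]

lemma pvBLoop_ne {c : Char} (h : c ≠ '\\') (rest : List Char) (parts : List String) (cur : List Char) :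
    pvBLoop (c :: rest) parts cur =
      if c = ';' then pvBLoop rest (parts ++ [cur.asString]) []
      else pvBLoop rest parts (cur ++ [c]) := by
  cases rest <;> simp [pvBLoop, h]

-- main invariant: B's accumulator is the unescape of A's accumulator
lemma pvLoop_eq : ∀ (n : Nat) (l : List Char), l.length = n →
    ∀ (parts : List String) (cur curB : List Char),
    pvWF cur → curB = pvUnesc cur → pvALoop l parts cur = pvBLoop l parts curB := by
  intro n
  induction n using Nat.strong_induction_on with
  | _ n ih =>
    intro l hl parts cur curB hwf hcb
    cases l with
    | nil => simp [pvALoop, pvBLoop, hcb]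
    | cons c rest =>
      by_cases hc : c = '\\'
      · subst hc
        cases rest with
        | nil =>
          simp [pvALoop, pvBLoop, pvUnesc_append_bs hwf, hcb]
        | cons nxt rest' =>
          simp only [pvALoop, pvBLoop]
          exact ih rest'.length (by simp at hl; omega) rest' rfl parts _ _
            (pvWF_pair hwf nxt) (by rw [pvUnesc_append_pair hwf nxt, hcb])
      · rw [pvALoop_ne hc, pvBLoop_ne hc]
        by_cases hs : c = ';'
        · simp only [hs, hcb]
          exact ih rest.length (by simp at hl; omega) rest rfl _ [] [] pvWF_nil rfl
        · simp only [if_neg hs]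
          exact ih rest.length (by simp at hl; omega) rest rfl parts _ _
            (pvWF_single hwf hc) (by rw [pvUnesc_append_single hwf hc, hcb])

-- A's padding loop equals B's replicate padding
lemma pvAPad_eq (parts : List String) (expected : Int) :
    pvAPad parts expected = parts ++ List.replicate (expected - parts.length).toNat "" := by
  rw [pvAPad]
  split
  · rename_i h
    rw [pvAPad_eq (parts ++ [""]) expected]
    have hk : (expected - parts.length).toNat = (expected - (parts ++ [""]).length).toNat + 1 := by
      simp; omega
    rw [hk, List.replicate_succ]
    simp
  · rename_i h
    have : (expected - parts.length).toNat = 0 := by omega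
    simp [this]
termination_by (expected - parts.length).toNat
decreasing_by simp; omega

-- ===== VERDICT (by name: the statement is the Claim_ definition above) =====
theorem split_structured_py_spec : Claim_equal_split_structured_py := by
  intro value expected _
  unfold Spec_split_structured_py split_structured_py split_structured_py_alt
  rw [pvLoop_eq value.toList.length value.toList rfl [] [] [] pvWF_nil rfl, pvAPad_eq]
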